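-- pv_equiv track=rewrite | github.com/codralexandra/UniTBv-Archive | Retele de Calculatoare/ParitateBidimensionala_CRC/ParitateBidimensionala/functions.py | construct_matrix
-- ===== SOURCE A (Python) =====
-- def construct_matrix(message:str)->list[list[str]]:
--     """Returns a parity matrix from a string, calculating the parity bits accordingly."""
--
--     columns=8
--     rows=len(message)//7+1
--     parity_matrix = [['0' for symbol in range(columns)] for symbol in range(rows)]
--     symbol_count=0
--
--     #parity for lines
--     for i in range(rows-1):
--         parity_count=0
--         for j in range(columns-1):
--             parity_matrix[i][j]=message[symbol_count]
--             if(message[symbol_count]=='1'):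
--                 parity_count+=1
--             symbol_count+=1
--         if parity_count%2==0:
--             parity_matrix[i][columns-1]='0'
--         else: parity_matrix[i][columns-1]='1'
--
--     #parity for columns
--     for j in range(columns):
--         parity_count=0
--         for i in range(rows-1):
--            if(parity_matrix[i][j]=='1'):
--                 parity_count+=1
--         if parity_count%2==0:
--             parity_matrix[rows-1][j]='0'
--         else: parity_matrix[rows-1][j]='1'
--     return parity_matrix
-- ===== SOURCE B (Python) =====
-- def construct_matrix(message: str) -> list[list[str]]:
--     """Single-pass: emit each 8-cell row while folding it into a running
--     per-column count; the final row is the counts' parities."""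
--     matrix = []
--     col = [0] * 8
--     rest = message
--     while len(rest) >= 7:
--         chunk, rest = rest[:7], rest[7:]
--         row = list(chunk) + ['0' if chunk.count('1') % 2 == 0 else '1']
--         col = [c + (1 if x == '1' else 0) for c, x in zip(col, row)]
--         matrix.append(row)
--     matrix.append(['0' if c % 2 == 0 else '1' for c in col])
--     return matrix
-- ===== Notes on version B (the rewrite author's own statement) =====
-- stated objective: alternative
-- what changed: A preallocates a zero matrix and mutates it with index arithmetic in two phases (row pass, then a column-major rescan of the matrix); B consumes the string in one pass, slicing off 7-char chunks, emitting each finished 8-cell row directly and folding it into a running per-column counter, so the column rescan disappears and the final row is just the counters' parities.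
import Mathlib
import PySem

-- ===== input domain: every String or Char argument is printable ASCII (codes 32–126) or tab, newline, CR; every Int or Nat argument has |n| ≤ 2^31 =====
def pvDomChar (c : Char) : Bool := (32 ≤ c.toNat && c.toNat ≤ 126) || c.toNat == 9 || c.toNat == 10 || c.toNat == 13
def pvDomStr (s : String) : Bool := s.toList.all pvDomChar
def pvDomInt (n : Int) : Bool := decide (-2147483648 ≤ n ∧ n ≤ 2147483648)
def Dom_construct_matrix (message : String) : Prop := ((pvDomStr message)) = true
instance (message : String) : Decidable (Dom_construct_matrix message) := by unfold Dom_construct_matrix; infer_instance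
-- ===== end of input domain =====

-- B replaces A's two-phase matrix mutation (row pass + column-major rescan) by a single
-- chunk-consuming pass with a running per-column counter; same O(n) cost, different structure.

-- ===== PORT A =====
def aBit (pc : Nat) : String := if pc % 2 = 0 then "0" else "1"

-- 'parity_matrix[i][j] = v'
def aSetCell (m : List (List String)) (i j : Nat) (v : String) : List (List String) :=
  m.set i ((m.getD i []).set j v)

-- 'parity_matrix[i][j]'
def aGetCell (m : List (List String)) (i j : Nat) : String :=
  (m.getD i []).getD j ""

-- inner loop 'for j in range(columns-1)' with state (matrix, parity_count, symbol_count)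
def aInner (cs : List Char) (i : Nat) (st : List (List String) × Nat × Nat) :
    List (List String) × Nat × Nat :=
  (List.range 7).foldl (fun st j =>
    let c := cs.getD st.2.2 ' '
    (aSetCell st.1 i j (String.mk [c]),
     if c = '1' then st.2.1 + 1 else st.2.1,
     st.2.2 + 1)) st

-- outer loop 'for i in range(rows-1)' (r = remaining iterations)
def aRowLoop (cs : List Char) : Nat → Nat → Nat → List (List String) → List (List String)
  | 0, _, _, m => m
  | r + 1, i, sc, m =>
      let st := aInner cs i (m, 0, sc)
      aRowLoop cs r (i + 1) st.2.2 (aSetCell st.1 i 7 (aBit st.2.1))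

-- 'for i in range(rows-1)' counting '1's in column j
def aColCount (m : List (List String)) (r j : Nat) : Nat :=
  (List.range r).foldl (fun pc i => if aGetCell m i j = "1" then pc + 1 else pc) 0

-- 'for j in range(columns)'
def aColLoop (m0 : List (List String)) (rows : Nat) : List (List String) :=
  (List.range 8).foldl
    (fun m j => aSetCell m (rows - 1) j (aBit (aColCount m (rows - 1) j))) m0

def construct_matrix (message : String) : List (List String) :=
  let cs := message.toList
  let rows := cs.length / 7 + 1
  aColLoop (aRowLoop cs (rows - 1) 0 0 (List.replicate rows (List.replicate 8 "0"))) rows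

-- ===== PORT B =====
def bBit (c : Nat) : String := if c % 2 = 0 then "0" else "1"

-- 'list(chunk) + [parity bit of chunk]'
def bRow (chunk : List Char) : List String :=
  chunk.map (fun c => String.mk [c]) ++ [bBit (chunk.count '1')]

-- '[c + (1 if x == '1' else 0) for c, x in zip(col, row)]'
def bAdd (col : List Nat) (row : List String) : List Nat :=
  List.zipWith (fun c x => if x = "1" then c + 1 else c) col row

-- 'while len(rest) >= 7: chunk, rest = rest[:7], rest[7:] …'
def bLoop (rest : List Char) (matrix : List (List String)) (col : List Nat) :
    List (List String) :=
  if h : 7 ≤ rest.length then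
    let row := bRow (rest.take 7)
    bLoop (rest.drop 7) (matrix ++ [row]) (bAdd col row)
  else
    matrix ++ [col.map bBit]
termination_by rest.length
decreasing_by simp; omega

def construct_matrix_alt (message : String) : List (List String) :=
  bLoop message.toList [] (List.replicate 8 0)

-- ===== PRECONDITION & SPEC =====
def Spec_construct_matrix (message : String) (out : List (List String)) : Prop := out = construct_matrix_alt message
instance (message : String) (out : List (List String)) : Decidable (Spec_construct_matrix message out) := by unfold Spec_construct_matrix; infer_instance

-- ===== CLAIM (what is proved, stated in full; the proofs are below) =====
def Claim_equal_construct_matrix : Prop := ∀ (message : String), Dom_construct_matrix message → Spec_construct_matrix message (construct_matrix message)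

-- ===== LEMMAS AND PROOFS =====

-- the data rows, chunk by chunk
def specRows (rest : List Char) : Nat → List (List String)
  | 0 => []
  | r + 1 => bRow (rest.take 7) :: specRows (rest.drop 7) r

def blank8 : List String := List.replicate 8 "0"

-- number of '1' cells in column j of the data rows
def cnt (data : List (List String)) (j : Nat) : Nat :=
  data.countP (fun row => row.getD j "" == "1")

lemma pvBitCong (m n : Nat) (h : m % 2 = n % 2) : aBit m = bBit n := by
  unfold aBit bBit; rw [h]

lemma getD_drop (cs : List Char) (sc j : Nat) (d : Char) :
    cs.getD (sc + j) d = (cs.drop sc).getD j d := by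
  induction sc generalizing cs with
  | zero => simp
  | succ n ih =>
    cases cs with
    | nil => simp
    | cons x xs => simpa [Nat.succ_add] using ih xs

lemma exists7 (rest : List Char) (h : 7 ≤ rest.length) :
    ∃ a b c d e f g t, rest = a :: b :: c :: d :: e :: f :: g :: t := by
  rcases rest with _|⟨a,rest⟩; · simp at h
  rcases rest with _|⟨b,rest⟩; · simp at h
  rcases rest with _|⟨c,rest⟩; · simp at h
  rcases rest with _|⟨d,rest⟩; · simp at h
  rcases rest with _|⟨e,rest⟩; · simp at h
  rcases rest with _|⟨f,rest⟩; · simp at h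
  rcases rest with _|⟨g,rest⟩; · simp at h
  exact ⟨a,b,c,d,e,f,g,rest,rfl⟩

lemma aSetCell_mid (pre post : List (List String)) (row : List String) (j : Nat) (v : String) :
    aSetCell (pre ++ row :: post) pre.length j v = pre ++ row.set j v :: post := by
  unfold aSetCell
  induction pre with
  | nil => simp [List.getD]
  | cons x xs ih => simpa using ih

set_option maxHeartbeats 1000000 in
lemma aRow_step (cs : List Char) (pre post : List (List String)) (sc : Nat)
    (h : 7 + sc ≤ cs.length) :
    (aSetCell (aInner cs pre.length (pre ++ blank8 :: post, 0, sc)).1 pre.length 7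
        (aBit (aInner cs pre.length (pre ++ blank8 :: post, 0, sc)).2.1)
      = pre ++ bRow ((cs.drop sc).take 7) :: post)
    ∧ (aInner cs pre.length (pre ++ blank8 :: post, 0, sc)).2.2 = sc + 7 := by
  have hlen : 7 ≤ (cs.drop sc).length := by simp; omega
  obtain ⟨a,b,c,d,e,f,g,t,hrest⟩ := exists7 _ hlen
  have e0 : cs.getD sc ' ' = a := by
    have := getD_drop cs sc 0 ' '; rw [hrest] at this; simpa using this
  have e1 : cs.getD (sc+1) ' ' = b := by
    have := getD_drop cs sc 1 ' '; rw [hrest] at this; simpa using this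
  have e2 : cs.getD (sc+1+1) ' ' = c := by
    have := getD_drop cs sc 2 ' '; rw [hrest] at this; simpa [Nat.add_assoc] using this
  have e3 : cs.getD (sc+1+1+1) ' ' = d := by
    have := getD_drop cs sc 3 ' '; rw [hrest] at this; simpa [Nat.add_assoc] using this
  have e4 : cs.getD (sc+1+1+1+1) ' ' = e := by
    have := getD_drop cs sc 4 ' '; rw [hrest] at this; simpa [Nat.add_assoc] using this
  have e5 : cs.getD (sc+1+1+1+1+1) ' ' = f := by
    have := getD_drop cs sc 5 ' '; rw [hrest] at this; simpa [Nat.add_assoc] using this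
  have e6 : cs.getD (sc+1+1+1+1+1+1) ' ' = g := by
    have := getD_drop cs sc 6 ' '; rw [hrest] at this; simpa [Nat.add_assoc] using this
  refine ⟨?_, ?_⟩
  · simp only [aInner, show List.range 7 = [0,1,2,3,4,5,6] from rfl, List.foldl,
      e0, e1, e2, e3, e4, e5, e6, aSetCell_mid, blank8, hrest]
    rw [List.append_right_inj]
    rw [show (a :: b :: c :: d :: e :: f :: g :: t).take 7 = [a,b,c,d,e,f,g] from rfl]
    simp only [List.cons.injEq, and_true]
    simp only [List.replicate, bRow, List.map, List.count_cons, List.count_nil, beq_iff_eq,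
      List.cons_append, List.nil_append, List.set_cons_zero, List.set_cons_succ, List.cons.injEq, true_and]
    exact ⟨pvBitCong _ _ (by split_ifs <;> omega), trivial⟩
  · simp only [aInner, show List.range 7 = [0,1,2,3,4,5,6] from rfl, List.foldl]

lemma rowLoop_spec (cs : List Char) :
    ∀ (r : Nat) (sc : Nat) (pre : List (List String)), 7 * r + sc ≤ cs.length →
    aRowLoop cs r pre.length sc (pre ++ List.replicate (r + 1) blank8)
      = pre ++ specRows (cs.drop sc) r ++ [blank8] := by
  intro r
  induction r with
  | zero => intro sc pre h; simp [aRowLoop, specRows]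
  | succ r ih =>
    intro sc pre h
    have h7 : 7 + sc ≤ cs.length := by omega
    obtain ⟨hm, hsc⟩ := aRow_step cs pre (List.replicate (r + 1) blank8) sc h7
    rw [show List.replicate (r + 1 + 1) blank8 = blank8 :: List.replicate (r + 1) blank8 from rfl]
    rw [aRowLoop, hm, hsc]
    rw [show pre ++ bRow ((cs.drop sc).take 7) :: List.replicate (r + 1) blank8
        = (pre ++ [bRow ((cs.drop sc).take 7)]) ++ List.replicate (r + 1) blank8 from by simp]
    rw [show pre.length + 1 = (pre ++ [bRow ((cs.drop sc).take 7)]).length from by simp]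
    rw [ih (sc + 7) _ (by omega)]
    simp [specRows, List.drop_drop]

lemma colfold (j : Nat) :
    ∀ (data : List (List String)) (init : Nat),
    (List.range data.length).foldl
        (fun pc i => if (data.getD i []).getD j "" = "1" then pc + 1 else pc) init
      = init + cnt data j := by
  intro data
  induction data with
  | nil => simp [cnt]
  | cons row data ih =>
    intro init
    rw [show (row :: data).length = data.length + 1 from rfl, List.range_succ_eq_map]
    simp only [List.foldl_cons, List.foldl_map, List.getD_cons_succ, List.getD_cons_zero]
    rw [ih]
    simp only [cnt, List.countP_cons]
    split <;> simp_all <;> omega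

lemma colCount_eq (data : List (List String)) (x : List String) (j : Nat) :
    aColCount (data ++ [x]) data.length j = cnt data j := by
  unfold aColCount
  rw [PySem.List.foldl_congr_mem _ _
    (fun pc i => if (data.getD i []).getD j "" = "1" then pc + 1 else pc) _
    (by
      intro pc i hi
      rw [List.mem_range] at hi
      unfold aGetCell
      rw [List.getD_append _ _ _ _ hi])]
  simpa using colfold j data 0

lemma colLoop_spec (data : List (List String)) :
    aColLoop (data ++ [blank8]) (data.length + 1)
      = data ++ [[aBit (cnt data 0), aBit (cnt data 1), aBit (cnt data 2), aBit (cnt data 3),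
                  aBit (cnt data 4), aBit (cnt data 5), aBit (cnt data 6), aBit (cnt data 7)]] := by
  simp only [aColLoop, show List.range 8 = [0,1,2,3,4,5,6,7] from rfl, List.foldl,
    Nat.add_sub_cancel]
  rw [show data ++ [blank8] = data ++ blank8 :: [] from rfl]
  rw [colCount_eq, aSetCell_mid, colCount_eq, aSetCell_mid, colCount_eq, aSetCell_mid,
      colCount_eq, aSetCell_mid, colCount_eq, aSetCell_mid, colCount_eq, aSetCell_mid,
      colCount_eq, aSetCell_mid, colCount_eq, aSetCell_mid]
  simp [blank8]

lemma bLoop_spec :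
    ∀ (rest : List Char) (matrix : List (List String)) (col : List Nat),
    bLoop rest matrix col
      = matrix ++ specRows rest (rest.length / 7)
          ++ [((specRows rest (rest.length / 7)).foldl bAdd col).map bBit] := by
  intro rest matrix col
  induction rest, matrix, col using bLoop.induct with
  | case1 rest matrix col h row ih =>
    rw [bLoop, dif_pos h]
    rw [show rest.length / 7 = (rest.drop 7).length / 7 + 1 from by
      rw [List.length_drop, ← Nat.div_eq_sub_div (by norm_num) h]]
    rw [ih]
    simp only [specRows, List.foldl_cons, List.append_assoc, List.cons_append, List.nil_append,
      List.length_drop, List.cons.injEq, List.append_cancel_left_eq]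
    exact ⟨rfl, rfl, trivial⟩
  | case2 rest matrix col h =>
    rw [bLoop, dif_neg h]
    rw [show rest.length / 7 = 0 from Nat.div_eq_of_lt (by omega)]
    simp [specRows]

lemma specRows_len :
    ∀ (r : Nat) (cs : List Char), (specRows cs r).length = r := by
  intro r
  induction r with
  | zero => intro cs; simp [specRows]
  | succ r ih => intro cs; simp [specRows, ih]

lemma specRows_rows8 :
    ∀ (r : Nat) (cs : List Char), 7 * r ≤ cs.length → ∀ row ∈ specRows cs r, row.length = 8 := by
  intro r
  induction r with
  | zero => intro cs h row hrow; simp [specRows] at hrow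
  | succ r ih =>
    intro cs h row hrow
    simp only [specRows, List.mem_cons] at hrow
    rcases hrow with hrow | hrow
    · subst hrow; simp [bRow]; omega
    · exact ih (cs.drop 7) (by simp; omega) row hrow

lemma exists8n (col : List Nat) (h : col.length = 8) :
    ∃ a b c d e f g k, col = [a,b,c,d,e,f,g,k] := by
  rcases col with _|⟨a,col⟩; · simp at h
  rcases col with _|⟨b,col⟩; · simp at h
  rcases col with _|⟨c,col⟩; · simp at h
  rcases col with _|⟨d,col⟩; · simp at h
  rcases col with _|⟨e,col⟩; · simp at h
  rcases col with _|⟨f,col⟩; · simp at h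
  rcases col with _|⟨g,col⟩; · simp at h
  rcases col with _|⟨k,col⟩; · simp at h
  rcases col with _|⟨x,col⟩
  · exact ⟨a,b,c,d,e,f,g,k,rfl⟩
  · simp at h

lemma exists8s (row : List String) (h : row.length = 8) :
    ∃ a b c d e f g k, row = [a,b,c,d,e,f,g,k] := by
  rcases row with _|⟨a,row⟩; · simp at h
  rcases row with _|⟨b,row⟩; · simp at h
  rcases row with _|⟨c,row⟩; · simp at h
  rcases row with _|⟨d,row⟩; · simp at h
  rcases row with _|⟨e,row⟩; · simp at h
  rcases row with _|⟨f,row⟩; · simp at h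
  rcases row with _|⟨g,row⟩; · simp at h
  rcases row with _|⟨k,row⟩; · simp at h
  rcases row with _|⟨x,row⟩
  · exact ⟨a,b,c,d,e,f,g,k,rfl⟩
  · simp at h

lemma foldl_bAdd :
    ∀ (data : List (List String)), (∀ row ∈ data, row.length = 8) →
    ∀ col : List Nat, col.length = 8 →
    data.foldl bAdd col
      = [col.getD 0 0 + cnt data 0, col.getD 1 0 + cnt data 1, col.getD 2 0 + cnt data 2,
         col.getD 3 0 + cnt data 3, col.getD 4 0 + cnt data 4, col.getD 5 0 + cnt data 5,
         col.getD 6 0 + cnt data 6, col.getD 7 0 + cnt data 7] := by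
  intro data
  induction data with
  | nil =>
    intro _ col hcol
    obtain ⟨a,b,c,d,e,f,g,k,rfl⟩ := exists8n col hcol
    simp [cnt]
  | cons row data ih =>
    intro hall col hcol
    obtain ⟨a,b,c,d,e,f,g,k,rfl⟩ := exists8n col hcol
    obtain ⟨x0,x1,x2,x3,x4,x5,x6,x7,hrow⟩ := exists8s row (hall row (by simp))
    subst hrow
    rw [List.foldl_cons]
    rw [show bAdd [a,b,c,d,e,f,g,k] [x0,x1,x2,x3,x4,x5,x6,x7]
        = [if x0 = "1" then a+1 else a, if x1 = "1" then b+1 else b, if x2 = "1" then c+1 else c,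
           if x3 = "1" then d+1 else d, if x4 = "1" then e+1 else e, if x5 = "1" then f+1 else f,
           if x6 = "1" then g+1 else g, if x7 = "1" then k+1 else k] from rfl]
    rw [ih (fun r hr => hall r (by simp [hr])) _ (by rfl)]
    simp only [cnt, List.countP_cons, List.getD_cons_zero, List.getD_cons_succ, beq_iff_eq,
      List.cons.injEq, and_true]
    refine ⟨?_, ?_, ?_, ?_, ?_, ?_, ?_, ?_⟩ <;> (split <;> omega)

theorem construct_matrix_spec : Claim_equal_construct_matrix := by
  intro message _
  show construct_matrix message = construct_matrix_alt message
  unfold construct_matrix construct_matrix_alt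
  have h7k : 7 * (message.toList.length / 7) ≤ message.toList.length := by omega
  have hrow := rowLoop_spec message.toList (message.toList.length / 7) 0 [] (by omega)
  simp only [List.nil_append, List.length_nil, List.drop_zero] at hrow
  simp only [Nat.add_sub_cancel]
  rw [show (List.replicate 8 "0") = blank8 from rfl] at *
  rw [hrow]
  have hlen := specRows_len (message.toList.length / 7) message.toList
  rw [show message.toList.length / 7 + 1
      = (specRows message.toList (message.toList.length / 7)).length + 1 from by rw [hlen]]
  rw [colLoop_spec]
  rw [bLoop_spec]
  rw [show (specRows message.toList (message.toList.length / 7)).length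
      = message.toList.length / 7 from hlen] at *
  rw [foldl_bAdd _ (specRows_rows8 _ _ h7k) _ (by rfl)]
  simp [aBit, bBit]
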